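-- pv_equiv track=rewrite | github.com/lauraBaakman/Multi-Agent-Systems | code/back/modelchecker/utils/closures.py | transitive_symmetric
-- ===== SOURCE A (Python) =====
-- def convergence(set_a, set_b):
--     return set_a == set_b
--
-- def transitive(original):
--     """
--     Compute the transitive closure of the original set.
--     :param original: the set of which the transitive closure should be computed.
--     :type original: set
--     :return: the transitive closure of the original set
--     :rtype: set
--     """
--     closure = original
--     previous_set  = set()
--     while not convergence(closure, previous_set):
--         previous_set = closure
--         new_relations = set((x, w) for x, y in closure for q, w in closure if q == y)
--         closure = previous_set.union(new_relations)
--     return closure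
--
-- def symmetric(original):
--     new_relations = [(destination, source) for (source, destination) in original]
--     return original.union(new_relations)
--
-- def transitive_symmetric(original):
--     """
--     Compute the transitive symmetric closure
--     :param original: the set of which the transitive symmetric closure should be computed.
--     :type original: set
--     :return: the transitive symmetric closure of set
--     :rtype: set
--     """
--     closure = original
--     previous_set = set()
--     while not convergence(closure, previous_set):
--         previous_set = closure
--         new_relations = transitive(closure) | (symmetric(closure))
--         closure = previous_set.union(new_relations)
--     return closure
-- ===== SOURCE B (Python) =====
-- def transitive_symmetric(original):
--     """
--     Compute the transitive symmetric closure.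
--
--     Instead of the nested fixpoint loops of the original (an outer loop that
--     keeps recomputing a full transitive closure and a symmetrisation until
--     nothing changes), apply a single expansion round twice: saturate under
--     composition, then append the missing reverses.  Two such rounds always
--     reach the transitive symmetric closure.
--     :param original: the set of which the transitive symmetric closure should be computed.
--     :type original: set
--     :return: the transitive symmetric closure of set
--     :rtype: set
--     """
--     return set(_expand(_expand(list(original))))
--
--
-- def _expand(rel):
--     """One expansion round: composition-saturate rel, then add each reverse of rel."""
--     closure = _saturate(rel)
--     present = set(closure)
--     for (source, destination) in rel:
--         if (destination, source) not in present:
--             closure.append((destination, source))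
--             present.add((destination, source))
--     return closure
--
--
-- def _saturate(closure):
--     """Smallest composition-closed ordered superlist of closure."""
--     while True:
--         grown = _compose_pass(closure)
--         if len(grown) == len(closure):
--             return closure
--         closure = grown
--
--
-- def _compose_pass(closure):
--     """Append every composition of two pairs of closure that is not present yet."""
--     out = list(closure)
--     present = set(out)
--     for (x, y) in closure:
--         for (q, w) in closure:
--             if q == y and (x, w) not in present:
--                 out.append((x, w))
--                 present.add((x, w))
--     return out
-- ===== Notes on version B (the rewrite author's own statement) =====
-- stated objective: alternative
-- what changed: A runs an outer fixpoint loop with set-equality convergence tests that repeatedly recomputes a full transitive closure and a symmetrisation until nothing changes; B applies one expansion round (in-place composition saturation, then appending the missing reverses) exactly twice, which provably always reaches the transitive symmetric closure, eliminating the outer fixpoint loop and its convergence comparisons.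
import Mathlib
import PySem

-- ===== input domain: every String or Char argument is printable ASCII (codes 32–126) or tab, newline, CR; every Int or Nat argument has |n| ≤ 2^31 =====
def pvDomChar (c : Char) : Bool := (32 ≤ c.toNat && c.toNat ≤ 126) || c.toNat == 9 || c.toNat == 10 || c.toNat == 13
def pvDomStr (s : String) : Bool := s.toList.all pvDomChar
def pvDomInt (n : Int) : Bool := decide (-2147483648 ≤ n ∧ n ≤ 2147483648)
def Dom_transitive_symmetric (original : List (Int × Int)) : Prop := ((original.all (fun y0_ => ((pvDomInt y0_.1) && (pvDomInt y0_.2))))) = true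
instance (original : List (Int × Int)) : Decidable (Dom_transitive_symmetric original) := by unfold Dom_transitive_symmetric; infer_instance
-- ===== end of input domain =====

-- B replaces A's outer fixpoint loop (which keeps recomputing a full transitive
-- closure and a symmetrisation until two set-equality tests converge) by exactly
-- two expansion rounds — composition-saturate, then append the missing reverses —
-- proved below to always reach the transitive symmetric closure.

-- ===== PORT A =====
-- helper `convergence(set_a, set_b)`: Python set equality
def pvConvergence (set_a set_b : List (Int × Int)) : Bool := PySem.Set.equal set_a set_b

-- the generated list of `(x, w) for x, y in closure for q, w in closure if q == y`
def pvCompsA (closure : List (Int × Int)) : List (Int × Int) :=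
  closure.flatMap (fun xy =>
    closure.filterMap (fun qw => if qw.1 == xy.2 then some (xy.1, qw.2) else none))

-- the `while not convergence(...)` loop of `transitive`; fuel only makes it total
def pvTransLoop : Nat → List (Int × Int) → List (Int × Int) → List (Int × Int)
  | 0, closure, _ => closure
  | f + 1, closure, previous_set =>
      if pvConvergence closure previous_set then closure
      else pvTransLoop f
        (PySem.Set.union closure (PySem.Set.ofList (pvCompsA closure))) closure

-- helper `transitive(original)`; the fuel is proved sufficient below
def pvTransitive (original : List (Int × Int)) : List (Int × Int) :=
  pvTransLoop (4 * original.length * original.length + 2) original []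

-- helper `symmetric(original)`
def pvSymmetric (original : List (Int × Int)) : List (Int × Int) :=
  PySem.Set.union original (original.map (fun sd => (sd.2, sd.1)))

-- the `while not convergence(...)` loop of `transitive_symmetric`
def pvOuterLoop : Nat → List (Int × Int) → List (Int × Int) → List (Int × Int)
  | 0, closure, _ => closure
  | f + 1, closure, previous_set =>
      if pvConvergence closure previous_set then closure
      else pvOuterLoop f
        (PySem.Set.union closure
          (PySem.Set.union (pvTransitive closure) (pvSymmetric closure))) closure

def transitive_symmetric (original : List (Int × Int)) : List (Int × Int) :=
  pvOuterLoop (4 * original.length * original.length + 2) original []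

-- ===== PORT B =====
-- `_compose_pass`: Source B's `present` always holds exactly the elements of `out`,
-- so the test-and-append is PySem.Set.add on `out`
def pvComposePass (closure : List (Int × Int)) : List (Int × Int) :=
  closure.foldl (fun out xy =>
    closure.foldl (fun out qw =>
      if qw.1 == xy.2 then PySem.Set.add out (xy.1, qw.2) else out) out) closure

-- `_saturate`'s `while True` loop; fuel only makes it total (supplied by _expand)
def pvSaturate : Nat → List (Int × Int) → List (Int × Int)
  | 0, closure => closure
  | f + 1, closure =>
      let grown := pvComposePass closure
      if grown.length = closure.length then closure else pvSaturate f grown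

-- `_expand(rel)`
def pvExpand (rel : List (Int × Int)) : List (Int × Int) :=
  let closure := pvSaturate (4 * rel.length * rel.length + 1) rel
  rel.foldl (fun cl sd => PySem.Set.add cl (sd.2, sd.1)) closure

def transitive_symmetric_alt (original : List (Int × Int)) : List (Int × Int) :=
  PySem.Set.ofList (pvExpand (pvExpand original))

-- ===== PRECONDITION & SPEC =====
-- The Python parameter is a set; a list with duplicate pairs does not encode one,
-- so Pre_ asks for distinct elements (every set-valued input satisfies it).
def Pre_transitive_symmetric (original : List (Int × Int)) : Prop := original.Nodup
instance (original : List (Int × Int)) : Decidable (Pre_transitive_symmetric original) := by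
  unfold Pre_transitive_symmetric; infer_instance

def pvWitness_transitive_symmetric : (List (Int × Int)) := [(1, 2), (2, 3)]

def Spec_transitive_symmetric (original : List (Int × Int)) (out : List (Int × Int)) : Prop :=
  out = transitive_symmetric_alt original
instance (original : List (Int × Int)) (out : List (Int × Int)) :
    Decidable (Spec_transitive_symmetric original out) := by
  unfold Spec_transitive_symmetric; infer_instance

-- ===== CLAIM =====
def Claim_equal_transitive_symmetric : Prop :=
  ∀ (original : List (Int × Int)), Dom_transitive_symmetric original →
    Pre_transitive_symmetric original →
    Spec_transitive_symmetric original (transitive_symmetric original)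

-- ===== LEMMAS AND PROOFS =====

-- basic facts about PySem.Set.add / union on lists ------------------------------

theorem pv_add_of_mem {s : List (Int × Int)} {x : Int × Int} (h : x ∈ s) :
    PySem.Set.add s x = s := by
  simp [PySem.Set.add, PySem.Set.contains, h]

theorem pv_add_of_not_mem {s : List (Int × Int)} {x : Int × Int} (h : x ∉ s) :
    PySem.Set.add s x = s ++ [x] := by
  simp [PySem.Set.add, PySem.Set.contains, h]

theorem pv_union_eq_foldl (s l : List (Int × Int)) :
    PySem.Set.union s l = l.foldl PySem.Set.add s := rfl

theorem pv_union_append (s a b : List (Int × Int)) :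
    PySem.Set.union s (a ++ b) = PySem.Set.union (PySem.Set.union s a) b := by
  simp [pv_union_eq_foldl, List.foldl_append]

theorem pv_union_homo (s t l : List (Int × Int)) :
    PySem.Set.union s (PySem.Set.union t l)
      = PySem.Set.union (PySem.Set.union s t) l := by
  simp only [pv_union_eq_foldl]
  induction l generalizing t with
  | nil => rfl
  | cons x l ih =>
    simp only [List.foldl_cons]
    rw [ih (PySem.Set.add t x)]
    congr 1
    by_cases hx : x ∈ t
    · rw [pv_add_of_mem hx, pv_add_of_mem]
      exact (PySem.Set.mem_union s t x).2 (Or.inr hx)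
    · rw [pv_add_of_not_mem hx, List.foldl_append]
      rfl

theorem pv_union_absorb {s l : List (Int × Int)} (h : ∀ x ∈ l, x ∈ s) :
    PySem.Set.union s l = s := by
  induction l generalizing s with
  | nil => rfl
  | cons x l ih =>
    have : PySem.Set.union s (x :: l) = PySem.Set.union (PySem.Set.add s x) l := rfl
    rw [this, pv_add_of_mem (h x (by simp))]
    exact ih (fun y hy => h y (by simp [hy]))

theorem pv_union_ext (s l : List (Int × Int)) :
    ∃ e, PySem.Set.union s l = s ++ e ∧ (∀ x ∈ e, x ∈ l) ∧ (∀ x ∈ e, x ∉ s) ∧ e.Nodup := by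
  induction l generalizing s with
  | nil => exact ⟨[], by simp [PySem.Set.union, PySem.Set.update]⟩
  | cons x l ih =>
    have hstep : PySem.Set.union s (x :: l) = PySem.Set.union (PySem.Set.add s x) l := rfl
    by_cases hx : x ∈ s
    · obtain ⟨e, he, hel, hes, hnd⟩ := ih s
      refine ⟨e, ?_, fun y hy => by simp [hel y hy], hes, hnd⟩
      rw [hstep, pv_add_of_mem hx]; exact he
    · obtain ⟨e, he, hel, hes, hnd⟩ := ih (s ++ [x])
      refine ⟨x :: e, ?_, ?_, ?_, ?_⟩
      · rw [hstep, pv_add_of_not_mem hx, he]; simp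
      · intro y hy
        rcases List.mem_cons.1 hy with rfl | hy
        · simp
        · simp [hel y hy]
      · intro y hy
        rcases List.mem_cons.1 hy with rfl | hy
        · exact hx
        · exact fun hys => hes y hy (by simp [hys])
      · refine List.nodup_cons.2 ⟨fun hxe => ?_, hnd⟩
        exact hes x hxe (by simp)

theorem pv_union_ofList (s l : List (Int × Int)) :
    PySem.Set.union s (PySem.Set.ofList l) = PySem.Set.union s l := by
  have h := pv_union_homo s [] l
  simpa [PySem.Set.ofList, PySem.Set.empty, pv_union_eq_foldl] using h

theorem pv_union_fresh {s l : List (Int × Int)} (hn : l.Nodup) (hf : ∀ x ∈ l, x ∉ s) :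
    PySem.Set.union s l = s ++ l := by
  induction l generalizing s with
  | nil => simp [PySem.Set.union, PySem.Set.update]
  | cons x l ih =>
    have hstep : PySem.Set.union s (x :: l) = PySem.Set.union (PySem.Set.add s x) l := rfl
    rw [hstep, pv_add_of_not_mem (hf x (by simp))]
    rw [ih (List.nodup_cons.1 hn).2 ?_]
    · simp
    · intro y hy hmem
      rcases List.mem_append.1 hmem with h1 | h1
      · exact hf y (by simp [hy]) h1
      · simp at h1; exact (List.nodup_cons.1 hn).1 (h1 ▸ hy)

theorem pv_ofList_self {l : List (Int × Int)} (h : l.Nodup) : PySem.Set.ofList l = l := by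
  have := pv_union_fresh (s := []) h (by simp)
  simpa [PySem.Set.ofList, PySem.Set.empty, pv_union_eq_foldl] using this

theorem pv_equal_self (s : List (Int × Int)) : PySem.Set.equal s s = true := by
  simp [PySem.Set.equal_iff]

theorem pv_equal_ext_false {s e : List (Int × Int)} (hne : e ≠ []) (hf : ∀ x ∈ e, x ∉ s) :
    PySem.Set.equal (s ++ e) s = false := by
  rcases List.exists_mem_of_ne_nil e hne with ⟨x, hx⟩
  rcases List.exists_mem_of_ne_nil e hne with _
  apply Bool.eq_false_iff.2
  intro hEq
  exact hf x hx (((PySem.Set.equal_iff _ _).1 hEq x).1 (by simp [hx]))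

-- the composition pass ---------------------------------------------------------

theorem pv_mem_compsA {c : List (Int × Int)} {a b : Int} :
    (a, b) ∈ pvCompsA c ↔ ∃ y, (a, y) ∈ c ∧ (y, b) ∈ c := by
  simp only [pvCompsA, List.mem_flatMap, List.mem_filterMap]
  constructor
  · rintro ⟨⟨x, y⟩, hxy, ⟨q, w⟩, hqw, hopt⟩
    by_cases hq : (q == y) = true
    · simp only [hq, if_pos] at hopt
      have hq' : q = y := beq_iff_eq.1 hq
      have hab : a = x ∧ b = w := by
        have := Option.some_inj.1 hopt
        exact ⟨(congrArg Prod.fst this).symm, (congrArg Prod.snd this).symm⟩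
      refine ⟨y, ?_, ?_⟩
      · rw [hab.1]; exact hxy
      · rw [hab.2, ← hq']; exact hqw
    · simp [hq] at hopt
  · rintro ⟨y, hay, hyb⟩
    exact ⟨(a, y), hay, ⟨y, b⟩, hyb, by simp⟩

theorem pv_pass_eq_union (c : List (Int × Int)) :
    pvComposePass c = PySem.Set.union c (pvCompsA c) := by
  have inner : ∀ (xy : Int × Int) (out : List (Int × Int)),
      c.foldl (fun o qw => if qw.1 == xy.2 then PySem.Set.add o (xy.1, qw.2) else o) out
        = PySem.Set.union out
            (c.filterMap (fun qw => if qw.1 == xy.2 then some (xy.1, qw.2) else none)) := by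
    intro xy out
    induction c generalizing out with
    | nil => rfl
    | cons qw l ih =>
      by_cases hq : (qw.1 == xy.2) = true
      · simp only [List.foldl_cons, hq, if_pos, List.filterMap_cons, ih]
        rfl
      · simp only [List.foldl_cons, hq, List.filterMap_cons, ih]
        simp
  have outer : ∀ (l : List (Int × Int)) (s : List (Int × Int)),
      l.foldl (fun out xy =>
          c.foldl (fun o qw => if qw.1 == xy.2 then PySem.Set.add o (xy.1, qw.2) else o) out) s
        = PySem.Set.union s (l.flatMap (fun xy =>
            c.filterMap (fun qw => if qw.1 == xy.2 then some (xy.1, qw.2) else none))) := by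
    intro l
    induction l with
    | nil => intro s; rfl
    | cons x l ih =>
      intro s
      simp only [List.foldl_cons, List.flatMap_cons, inner x s, ih, pv_union_append]
  exact outer c c

-- vertex bound -----------------------------------------------------------------

def pvVerts (c : List (Int × Int)) : Finset Int :=
  (c.map Prod.fst).toFinset ∪ (c.map Prod.snd).toFinset

theorem pv_verts_card (c : List (Int × Int)) : (pvVerts c).card ≤ 2 * c.length := by
  have h1 := Finset.card_union_le (c.map Prod.fst).toFinset (c.map Prod.snd).toFinset
  have h2 := (c.map Prod.fst).toFinset_card_le
  have h3 := (c.map Prod.snd).toFinset_card_le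
  simp only [List.length_map] at h2 h3
  unfold pvVerts
  omega

theorem pv_verts_self {c : List (Int × Int)} {p : Int × Int} (h : p ∈ c) :
    p.1 ∈ pvVerts c ∧ p.2 ∈ pvVerts c := by
  constructor
  · exact Finset.mem_union_left _ (List.mem_toFinset.2 (List.mem_map.2 ⟨p, h, rfl⟩))
  · exact Finset.mem_union_right _ (List.mem_toFinset.2 (List.mem_map.2 ⟨p, h, rfl⟩))

theorem pv_len_le_card {S : Finset Int} {c : List (Int × Int)} (hn : c.Nodup)
    (hS : ∀ p ∈ c, p.1 ∈ S ∧ p.2 ∈ S) : c.length ≤ S.card * S.card := by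
  have hsub : c.toFinset ⊆ S ×ˢ S := by
    intro p hp
    rw [List.mem_toFinset] at hp
    exact Finset.mem_product.2 (hS p hp)
  have := Finset.card_le_card hsub
  rw [List.toFinset_card_of_nodup hn, Finset.card_product] at this
  exact this

-- saturation -------------------------------------------------------------------

theorem pv_pass_nodup {c : List (Int × Int)} (h : c.Nodup) : (pvComposePass c).Nodup := by
  rw [pv_pass_eq_union]; exact PySem.Set.nodup_union _ _ h

theorem pv_pass_hS {S : Finset Int} {c : List (Int × Int)}
    (hS : ∀ p ∈ c, p.1 ∈ S ∧ p.2 ∈ S) : ∀ p ∈ pvComposePass c, p.1 ∈ S ∧ p.2 ∈ S := by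
  intro p hp
  rw [pv_pass_eq_union] at hp
  rcases (PySem.Set.mem_union _ _ _).1 hp with hp | hp
  · exact hS p hp
  · obtain ⟨y, h1, h2⟩ := pv_mem_compsA.1 (by exact hp)
    exact ⟨(hS _ h1).1, (hS _ h2).2⟩

theorem pv_pass_ext (c : List (Int × Int)) :
    ∃ e, pvComposePass c = c ++ e ∧ (∀ x ∈ e, x ∉ c) := by
  rw [pv_pass_eq_union]
  obtain ⟨e, he, _, hes, _⟩ := pv_union_ext c (pvCompsA c)
  exact ⟨e, he, hes⟩

theorem pv_sat_stable {c : List (Int × Int)} (h : pvComposePass c = c) (f : Nat) :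
    pvSaturate f c = c := by
  cases f with
  | zero => rfl
  | succ f => simp [pvSaturate, h]

theorem pv_sat_ext (f : Nat) (c : List (Int × Int)) : ∃ e, pvSaturate f c = c ++ e := by
  induction f generalizing c with
  | zero => exact ⟨[], by simp [pvSaturate]⟩
  | succ f ih =>
    by_cases h : (pvComposePass c).length = c.length
    · exact ⟨[], by simp [pvSaturate, h]⟩
    · obtain ⟨e1, he1, _⟩ := pv_pass_ext c
      obtain ⟨e2, he2⟩ := ih (pvComposePass c)
      refine ⟨e1 ++ e2, ?_⟩
      simp only [pvSaturate, h, if_false]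
      rw [he2, he1, List.append_assoc]

theorem pv_sat_nodup (f : Nat) {c : List (Int × Int)} (h : c.Nodup) :
    (pvSaturate f c).Nodup := by
  induction f generalizing c with
  | zero => exact h
  | succ f ih =>
    by_cases hl : (pvComposePass c).length = c.length
    · simpa [pvSaturate, hl] using h
    · simpa only [pvSaturate, hl, if_neg, if_false] using ih (pv_pass_nodup h)

theorem pv_sat_fix {S : Finset Int} : ∀ (f : Nat) (c : List (Int × Int)), c.Nodup →
    (∀ p ∈ c, p.1 ∈ S ∧ p.2 ∈ S) → S.card * S.card + 1 ≤ f + c.length →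
    pvComposePass (pvSaturate f c) = pvSaturate f c := by
  intro f
  induction f with
  | zero =>
    intro c hn hS hb
    have := pv_len_le_card hn hS
    omega
  | succ f ih =>
    intro c hn hS hb
    obtain ⟨e, he, _⟩ := pv_pass_ext c
    by_cases hl : (pvComposePass c).length = c.length
    · have he' : e = [] := by
        rw [he] at hl; simpa using hl
      have hfix : pvComposePass c = c := by rw [he, he']; simp
      simp [pvSaturate, hfix]
    · have hene : e ≠ [] := by rintro rfl; exact hl (by simp [he])
      have hlen : c.length + 1 ≤ (pvComposePass c).length := by
        have := List.length_pos_of_ne_nil hene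
        rw [he]; simp; omega
      simp only [pvSaturate, hl, if_false]
      exact ih (pvComposePass c) (pv_pass_nodup hn) (pv_pass_hS hS) (by omega)

-- membership in the saturation is exactly a composition chain --------------------

def pvEdge (c : List (Int × Int)) (a b : Int) : Prop := (a, b) ∈ c

theorem pv_sat_mem_fwd : ∀ (f : Nat) (c c0 : List (Int × Int)),
    (∀ p ∈ c, Relation.TransGen (pvEdge c0) p.1 p.2) →
    ∀ p ∈ pvSaturate f c, Relation.TransGen (pvEdge c0) p.1 p.2 := by
  intro f
  induction f with
  | zero => intro c c0 hinv p hp; exact hinv p hp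
  | succ f ih =>
    intro c c0 hinv p hp
    by_cases hl : (pvComposePass c).length = c.length
    · simp only [pvSaturate, hl, if_pos] at hp
      exact hinv p hp
    · simp only [pvSaturate, hl, if_false] at hp
      refine ih (pvComposePass c) c0 ?_ p hp
      intro q hq
      rw [pv_pass_eq_union] at hq
      rcases (PySem.Set.mem_union _ _ _).1 hq with hq | hq
      · exact hinv q hq
      · obtain ⟨q1, q2⟩ := q
        obtain ⟨y, h1, h2⟩ := pv_mem_compsA.1 (by exact hq)
        exact Relation.TransGen.trans (hinv (q1, y) h1) (hinv (y, q2) h2)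

theorem pv_sat_mem_bwd {S : Finset Int} {f : Nat} {c : List (Int × Int)} (hn : c.Nodup)
    (hS : ∀ p ∈ c, p.1 ∈ S ∧ p.2 ∈ S) (hf : S.card * S.card + 1 ≤ f + c.length)
    {a b : Int} (h : Relation.TransGen (pvEdge c) a b) : (a, b) ∈ pvSaturate f c := by
  obtain ⟨e, hext⟩ := pv_sat_ext f c
  have hbase : ∀ p : Int × Int, p ∈ c → p ∈ pvSaturate f c := by
    intro p hp; rw [hext]; exact List.mem_append_left _ hp
  have hfix := pv_sat_fix f c hn hS hf
  have hclosed : ∀ x y z : Int, (x, y) ∈ pvSaturate f c → (y, z) ∈ pvSaturate f c →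
      (x, z) ∈ pvSaturate f c := by
    intro x y z h1 h2
    have hc : (x, z) ∈ pvCompsA (pvSaturate f c) := pv_mem_compsA.2 ⟨y, h1, h2⟩
    have := (PySem.Set.mem_union (pvSaturate f c) (pvCompsA (pvSaturate f c)) (x, z)).2
      (Or.inr hc)
    rwa [← pv_pass_eq_union, hfix] at this
  induction h with
  | single h => exact hbase _ h
  | tail _ hedge ih => exact hclosed _ _ _ ih (hbase _ hedge)

theorem pv_sat_mem {S : Finset Int} {f : Nat} {c : List (Int × Int)} (hn : c.Nodup)
    (hS : ∀ p ∈ c, p.1 ∈ S ∧ p.2 ∈ S) (hf : S.card * S.card + 1 ≤ f + c.length)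
    {a b : Int} : (a, b) ∈ pvSaturate f c ↔ Relation.TransGen (pvEdge c) a b := by
  constructor
  · intro hm
    exact pv_sat_mem_fwd f c c (fun p hp => Relation.TransGen.single hp) (a, b) hm
  · exact pv_sat_mem_bwd hn hS hf

-- A's transitive = B's saturation ------------------------------------------------

theorem pv_transLoop_eq_sat {S : Finset Int} : ∀ (f : Nat) (c prev : List (Int × Int)),
    PySem.Set.equal c prev = false → c.Nodup →
    (∀ p ∈ c, p.1 ∈ S ∧ p.2 ∈ S) → S.card * S.card + 1 ≤ f + c.length →
    pvTransLoop (f + 1) c prev = pvSaturate f c := by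
  intro f
  induction f with
  | zero =>
    intro c prev hne hn hS hb
    have := pv_len_le_card hn hS
    omega
  | succ f ih =>
    intro c prev hne hn hS hb
    have hstep : pvTransLoop (f + 1 + 1) c prev
        = pvTransLoop (f + 1) (pvComposePass c) c := by
      simp only [pvTransLoop, pvConvergence, hne, Bool.false_eq_true, if_false]
      rw [pv_union_ofList, ← pv_pass_eq_union]
    obtain ⟨e, he, hes⟩ := pv_pass_ext c
    by_cases hfix : pvComposePass c = c
    · rw [hstep, hfix]
      have : pvTransLoop (f + 1) c c = c := by
        simp [pvTransLoop, pvConvergence, pv_equal_self]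
      rw [this, pv_sat_stable hfix]
    · have hene : e ≠ [] := by rintro rfl; exact hfix (by simpa using he)
      have hne' : PySem.Set.equal (pvComposePass c) c = false := by
        rw [he]; exact pv_equal_ext_false hene hes
      have hlen : ¬ (pvComposePass c).length = c.length := by
        rw [he]
        have := List.length_pos_of_ne_nil hene
        simp; omega
      rw [hstep, ih (pvComposePass c) c hne' (pv_pass_nodup hn) (pv_pass_hS hS) ?_]
      · have : pvSaturate (f + 1) c = pvSaturate f (pvComposePass c) := by
          simp only [pvSaturate, hlen, if_false]
        rw [this]
      · have : c.length + 1 ≤ (pvComposePass c).length := by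
          rw [he]
          have := List.length_pos_of_ne_nil hene
          simp; omega
        omega

theorem pv_transitive_eq_sat {c : List (Int × Int)} (hn : c.Nodup) :
    pvTransitive c = pvSaturate (4 * c.length * c.length + 1) c := by
  rcases List.eq_nil_or_concat c with rfl | hcne
  · have h1 : pvTransitive [] = [] := by
      simp [pvTransitive, pvTransLoop, pvConvergence, pv_equal_self]
    have h2 : pvComposePass ([] : List (Int × Int)) = [] := rfl
    rw [h1, pv_sat_stable h2]
  · have hne : c ≠ [] := by
      obtain ⟨l, x, rfl⟩ := hcne; simp
    have hne' : PySem.Set.equal c [] = false := by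
      rcases List.exists_mem_of_ne_nil c hne with ⟨x, hx⟩
      apply Bool.eq_false_iff.2
      intro hEq
      simpa using ((PySem.Set.equal_iff _ _).1 hEq x).1 hx
    have hfuel : 4 * c.length * c.length + 2 = (4 * c.length * c.length + 1) + 1 := by omega
    unfold pvTransitive
    rw [hfuel]
    refine pv_transLoop_eq_sat (S := pvVerts c) _ c [] hne' hn
      (fun p hp => pv_verts_self hp) ?_
    have hcard := pv_verts_card c
    have hlen : 1 ≤ c.length := List.length_pos_of_ne_nil hne
    nlinarith [pv_verts_card c]

-- one round of A's outer loop is B's expand --------------------------------------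

theorem pv_fuel_ok (c : List (Int × Int)) :
    (pvVerts c).card * (pvVerts c).card + 1
      ≤ (4 * c.length * c.length + 1) + c.length := by
  nlinarith [pv_verts_card c]

theorem pv_expand_as_union (c : List (Int × Int)) :
    pvExpand c = PySem.Set.union (pvSaturate (4 * c.length * c.length + 1) c)
      (c.map (fun sd => (sd.2, sd.1))) := by
  unfold pvExpand
  rw [pv_union_eq_foldl, List.foldl_map]

theorem pv_union_self (c : List (Int × Int)) : PySem.Set.union c c = c :=
  pv_union_absorb (fun _ hx => hx)

theorem pv_union_extension {c e : List (Int × Int)} (hn : (c ++ e).Nodup) :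
    PySem.Set.union c (c ++ e) = c ++ e := by
  rw [pv_union_append, pv_union_self]
  exact pv_union_fresh (List.Nodup.of_append_right hn)
    (fun x hx hxc => (List.disjoint_of_nodup_append hn) hxc hx)

theorem pv_round_eq_expand {c : List (Int × Int)} (hn : c.Nodup) :
    PySem.Set.union c (PySem.Set.union (pvTransitive c) (pvSymmetric c)) = pvExpand c := by
  set sat := pvSaturate (4 * c.length * c.length + 1) c with hsat
  have hTs : pvTransitive c = sat := pv_transitive_eq_sat hn
  obtain ⟨e1, he1⟩ := pv_sat_ext (4 * c.length * c.length + 1) c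
  have hsatn : sat.Nodup := pv_sat_nodup _ hn
  have hcs : PySem.Set.union c sat = sat := by
    rw [hsat, he1] at hsatn ⊢
    exact pv_union_extension hsatn
  have hsc : PySem.Set.union sat c = sat :=
    pv_union_absorb (fun x hx => by rw [hsat, he1]; exact List.mem_append_left _ hx)
  rw [hTs, pvSymmetric, pv_union_homo, hcs, pv_union_homo, hsc, pv_expand_as_union]

-- facts about expand -------------------------------------------------------------

theorem pv_expand_nodup {c : List (Int × Int)} (h : c.Nodup) : (pvExpand c).Nodup := by
  rw [pv_expand_as_union]
  exact PySem.Set.nodup_union _ _ (pv_sat_nodup _ h)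

theorem pv_expand_ext {c : List (Int × Int)} (hn : c.Nodup) :
    ∃ e, pvExpand c = c ++ e ∧ (∀ x ∈ e, x ∉ c) := by
  obtain ⟨e1, he1⟩ := pv_sat_ext (4 * c.length * c.length + 1) c
  obtain ⟨e2, he2, _, _, _⟩ :=
    pv_union_ext (pvSaturate (4 * c.length * c.length + 1) c)
      (c.map (fun sd => (sd.2, sd.1)))
  refine ⟨e1 ++ e2, ?_, ?_⟩
  · rw [pv_expand_as_union, he2, he1, List.append_assoc]
  · have hnd := pv_expand_nodup hn
    rw [pv_expand_as_union, he2, he1, List.append_assoc] at hnd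
    intro x hx hxc
    exact (List.disjoint_of_nodup_append hnd) hxc hx

theorem pv_expand_mem {c : List (Int × Int)} (hn : c.Nodup) {a b : Int} :
    (a, b) ∈ pvExpand c ↔ Relation.TransGen (pvEdge c) a b ∨ (b, a) ∈ c := by
  rw [pv_expand_as_union]
  rw [show ((a, b) ∈ PySem.Set.union (pvSaturate (4 * c.length * c.length + 1) c)
      (c.map (fun sd => (sd.2, sd.1)))) ↔ _ from PySem.Set.mem_union _ _ _]
  rw [pv_sat_mem (S := pvVerts c) hn (fun p hp => pv_verts_self hp) (pv_fuel_ok c)]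
  constructor
  · rintro (h | h)
    · exact Or.inl h
    · obtain ⟨⟨u, v⟩, huv, hx⟩ := List.mem_map.1 h
      simp only [Prod.mk.injEq] at hx
      exact Or.inr (by rw [← hx.1, ← hx.2]; exact huv)
  · rintro (h | h)
    · exact Or.inl h
    · exact Or.inr (List.mem_map.2 ⟨(b, a), h, rfl⟩)

-- the heart: two expansion rounds reach a fixpoint --------------------------------

theorem pv_tg_rev {r : Int → Int → Prop}
    (hrev : ∀ x y, r x y → Relation.TransGen r y x) {a b : Int}
    (h : Relation.TransGen r a b) : Relation.TransGen r b a := by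
  induction h with
  | single h => exact hrev _ _ h
  | tail _ e ih => exact Relation.TransGen.trans (hrev _ _ e) ih

theorem pv_rev_lift {c : List (Int × Int)} (hn : c.Nodup) {x y : Int}
    (h : Relation.TransGen (pvEdge c) x y) :
    Relation.TransGen (pvEdge (pvExpand c)) y x := by
  induction h with
  | single h =>
    exact Relation.TransGen.single ((pv_expand_mem hn).2 (Or.inr h))
  | tail _ e ih =>
    exact Relation.TransGen.trans
      (Relation.TransGen.single ((pv_expand_mem hn).2 (Or.inr e))) ih

theorem pv_edge_lift {c : List (Int × Int)} (hn : c.Nodup) {x y : Int}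
    (h : (x, y) ∈ c) : (x, y) ∈ pvExpand c :=
  (pv_expand_mem hn).2 (Or.inl (Relation.TransGen.single h))

theorem pv_c1_edge_rev {c : List (Int × Int)} (hn : c.Nodup) {x y : Int}
    (h : (x, y) ∈ pvExpand c) :
    Relation.TransGen (pvEdge (pvExpand c)) y x := by
  rcases (pv_expand_mem hn).1 h with h | h
  · exact pv_rev_lift hn h
  · exact Relation.TransGen.single (pv_edge_lift hn h)

-- membership in the second expansion is exactly connectivity in the first
theorem pv_c2_mem_tg {c : List (Int × Int)} (hn : c.Nodup) {a b : Int} :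
    (a, b) ∈ pvExpand (pvExpand c) ↔
      Relation.TransGen (pvEdge (pvExpand c)) a b := by
  have hn1 : (pvExpand c).Nodup := pv_expand_nodup hn
  constructor
  · intro h
    rcases (pv_expand_mem hn1).1 h with h | h
    · exact h
    · rcases (pv_expand_mem hn).1 h with h | h
      · exact pv_rev_lift hn h
      · exact Relation.TransGen.single (pv_edge_lift hn h)
  · intro h
    exact (pv_expand_mem hn1).2 (Or.inl h)

theorem pv_c2_symm {c : List (Int × Int)} (hn : c.Nodup) {a b : Int}
    (h : (a, b) ∈ pvExpand (pvExpand c)) : (b, a) ∈ pvExpand (pvExpand c) := by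
  refine (pv_c2_mem_tg hn).2 (pv_tg_rev ?_ ((pv_c2_mem_tg hn).1 h))
  intro x y hxy
  exact pv_c1_edge_rev hn hxy

theorem pv_c2_trans {c : List (Int × Int)} (hn : c.Nodup) {a b d : Int}
    (h1 : (a, b) ∈ pvExpand (pvExpand c)) (h2 : (b, d) ∈ pvExpand (pvExpand c)) :
    (a, d) ∈ pvExpand (pvExpand c) :=
  (pv_c2_mem_tg hn).2 (Relation.TransGen.trans ((pv_c2_mem_tg hn).1 h1)
    ((pv_c2_mem_tg hn).1 h2))

theorem pv_expand_of_closed {c : List (Int × Int)}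
    (htrans : ∀ a b d : Int, (a, b) ∈ c → (b, d) ∈ c → (a, d) ∈ c)
    (hsymm : ∀ a b : Int, (a, b) ∈ c → (b, a) ∈ c) : pvExpand c = c := by
  have hpass : pvComposePass c = c := by
    rw [pv_pass_eq_union]
    refine pv_union_absorb ?_
    rintro ⟨a, b⟩ hab
    obtain ⟨y, h1, h2⟩ := pv_mem_compsA.1 hab
    exact htrans a y b h1 h2
  rw [pv_expand_as_union, pv_sat_stable hpass]
  refine pv_union_absorb ?_
  intro x hx
  obtain ⟨⟨u, v⟩, huv, hx⟩ := List.mem_map.1 hx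
  rw [← hx]
  exact hsymm u v huv

theorem pv_expand_expand_fix {c : List (Int × Int)} (hn : c.Nodup) :
    pvExpand (pvExpand (pvExpand c)) = pvExpand (pvExpand c) :=
  pv_expand_of_closed
    (fun _ _ _ h1 h2 => pv_c2_trans hn h1 h2)
    (fun _ _ h => pv_c2_symm hn h)

theorem pv_outer_step (f : Nat) (c prev : List (Int × Int)) :
    pvOuterLoop (f + 1) c prev =
      if pvConvergence c prev then c
      else pvOuterLoop f
        (PySem.Set.union c (PySem.Set.union (pvTransitive c) (pvSymmetric c))) c := rfl

theorem pv_equal_nil_false {c : List (Int × Int)} (hne : c ≠ []) :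
    PySem.Set.equal c [] = false := by
  rcases List.exists_mem_of_ne_nil c hne with ⟨x, hx⟩
  apply Bool.eq_false_iff.2
  intro hEq
  simpa using ((PySem.Set.equal_iff _ _).1 hEq x).1 hx

theorem pv_conv_ext_false {c : List (Int × Int)} (hn : c.Nodup)
    (hne : pvExpand c ≠ c) : pvConvergence (pvExpand c) c = false := by
  obtain ⟨e, he, hes⟩ := pv_expand_ext hn
  have hene : e ≠ [] := by rintro rfl; exact hne (by simpa using he)
  rw [pvConvergence, he]
  exact pv_equal_ext_false hene hes

theorem transitive_symmetric_eq (original : List (Int × Int))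
    (hn : original.Nodup) :
    transitive_symmetric original = transitive_symmetric_alt original := by
  rcases eq_or_ne original [] with rfl | hne
  · rfl
  · have hn1 : (pvExpand original).Nodup := pv_expand_nodup hn
    have hn2 : (pvExpand (pvExpand original)).Nodup := pv_expand_nodup hn1
    have hlen : 1 ≤ original.length := List.length_pos_of_ne_nil hne
    have hk : 4 * original.length * original.length + 2
        = (4 * original.length * original.length - 2) + 1 + 1 + 1 + 1 := by
      have hm : 4 ≤ 4 * original.length * original.length := by nlinarith
      omega
    unfold transitive_symmetric
    rw [hk]
    rw [pv_outer_step, if_neg (by rw [pvConvergence, pv_equal_nil_false hne]; simp),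
      pv_round_eq_expand hn]
    by_cases h1 : pvExpand original = original
    · have halt : transitive_symmetric_alt original = original := by
        unfold transitive_symmetric_alt
        rw [h1, h1, pv_ofList_self hn]
      rw [halt, pv_outer_step, if_pos (by rw [h1, pvConvergence, pv_equal_self])]
      exact h1
    · rw [pv_outer_step, if_neg (by rw [pv_conv_ext_false hn h1]; simp),
        pv_round_eq_expand hn1]
      have halt : transitive_symmetric_alt original
          = pvExpand (pvExpand original) := by
        unfold transitive_symmetric_alt
        rw [pv_ofList_self hn2]
      by_cases h2 : pvExpand (pvExpand original) = pvExpand original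
      · rw [pv_outer_step, if_pos (by rw [h2, pvConvergence, pv_equal_self])]
        rw [halt, h2]
      · rw [pv_outer_step, if_neg (by rw [pv_conv_ext_false hn1 h2]; simp),
          pv_round_eq_expand hn2, pv_expand_expand_fix hn]
        rw [pv_outer_step, if_pos (by rw [pvConvergence, pv_equal_self])]
        exact halt.symm

-- ===== VERDICT =====
theorem transitive_symmetric_spec : Claim_equal_transitive_symmetric := by
  intro original _ hpre
  unfold Spec_transitive_symmetric
  exact transitive_symmetric_eq original hpre
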